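-- pv_equiv track=rewrite | github.com/quangminh1212/MTC_Download | export_all.py | _clean_body
-- ===== SOURCE A (Python) =====
-- def _clean_body(raw: str, title: str) -> str:
--     """Strip the corrupted title-repeat lines from the start of a chapter body."""
--     lines = raw.splitlines()
--     # Skip blank lines and the first non-blank line (corrupted title)
--     started = False
--     kept    = []
--     for line in lines:
--         if not started:
--             stripped = line.strip()
--             if not stripped:
--                 continue  # skip leading blanks
--             # First non-blank line is the corrupted title repeat — skip it
--             started = True
--             continue
--         kept.append(line)
--     return '\n'.join(kept).strip()
-- ===== SOURCE B (Python) =====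
-- def _clean_body(raw: str, title: str) -> str:
--     """Strip the corrupted title-repeat lines from the start of a chapter body."""
--     lines = raw.splitlines()
--     # Phase 1: find where the leading blank lines end.
--     i = 0
--     while i < len(lines) and not lines[i].strip():
--         i += 1
--     # Phase 2: drop the blanks plus the one title line, keep the rest.
--     return '\n'.join(lines[i + 1:]).strip()
-- ===== Notes on version B (the rewrite author's own statement) =====
-- stated objective: simpler
-- what changed: Replaces the started-flag accumulator loop with a two-phase form: find the index where the leading blank lines end, then slice off those plus the title line and join the rest.
import Mathlib
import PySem

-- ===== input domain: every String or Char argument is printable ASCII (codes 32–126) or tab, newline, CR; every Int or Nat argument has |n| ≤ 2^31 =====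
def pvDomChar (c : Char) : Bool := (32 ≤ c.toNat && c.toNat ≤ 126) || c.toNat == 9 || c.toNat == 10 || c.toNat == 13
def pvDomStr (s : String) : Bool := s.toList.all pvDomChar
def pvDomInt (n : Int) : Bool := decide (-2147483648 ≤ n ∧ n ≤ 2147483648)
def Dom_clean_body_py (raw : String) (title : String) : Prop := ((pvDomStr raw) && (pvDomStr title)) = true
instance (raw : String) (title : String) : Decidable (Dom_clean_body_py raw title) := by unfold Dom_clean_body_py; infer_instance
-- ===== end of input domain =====

-- B replaces A's started-flag accumulator loop by "count leading blank lines, then drop them plus one and join": simpler decomposition, same cost.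

-- ===== PORT A =====
-- step of A's for-loop: state = (started, kept)
def cleanBodyStep (st : Bool × List String) (line : String) : Bool × List String :=
  if !st.1 then
    if PySem.Str.strip line = "" then st
    else (true, st.2)
  else (st.1, st.2 ++ [line])

def clean_body_py (raw : String) (title : String) : String :=
  let lines := PySem.Str.splitlines raw
  let st := lines.foldl cleanBodyStep (false, [])
  PySem.Str.strip (PySem.Str.join "\n" st.2)

-- ===== PORT B =====
-- phase 1 of B: the while loop counting leading blank lines
def cleanBodySkip : List String → Nat
  | [] => 0
  | l :: ls => if PySem.Str.strip l = "" then cleanBodySkip ls + 1 else 0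

def clean_body_py_alt (raw : String) (title : String) : String :=
  let lines := PySem.Str.splitlines raw
  let i := cleanBodySkip lines
  PySem.Str.strip (PySem.Str.join "\n" (lines.drop (i + 1)))

-- ===== PRECONDITION & SPEC =====
def Spec_clean_body_py (raw : String) (title : String) (out : String) : Prop := out = clean_body_py_alt raw title
instance (raw : String) (title : String) (out : String) : Decidable (Spec_clean_body_py raw title out) := by unfold Spec_clean_body_py; infer_instance

-- ===== CLAIM (what is proved, stated in full; the proofs are below) =====
def Claim_equal_clean_body_py : Prop := ∀ (raw : String) (title : String), Dom_clean_body_py raw title → Spec_clean_body_py raw title (clean_body_py raw title)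

-- ===== LEMMAS AND PROOFS =====
-- once started, A's loop appends every remaining line
theorem cleanBody_foldl_started (ls : List String) (acc : List String) :
    ls.foldl cleanBodyStep (true, acc) = (true, acc ++ ls) := by
  induction ls generalizing acc with
  | nil => simp
  | cons l ls ih => simp [cleanBodyStep, ih]

-- A's kept list is exactly B's slice
theorem cleanBody_foldl_eq_drop (ls : List String) :
    (ls.foldl cleanBodyStep (false, [])).2 = ls.drop (cleanBodySkip ls + 1) := by
  induction ls with
  | nil => simp
  | cons l ls ih =>
    by_cases h : PySem.Str.strip l = ""
    · simp [cleanBodyStep, cleanBodySkip, h, ih]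
    · simp [cleanBodyStep, cleanBodySkip, h, cleanBody_foldl_started]

-- ===== VERDICT (by name: the statement is the Claim_ definition above) =====
theorem clean_body_py_spec : Claim_equal_clean_body_py := by
  intro raw title _
  show _ = _
  simp only [clean_body_py, clean_body_py_alt]
  rw [cleanBody_foldl_eq_drop]
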